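-- pv_equiv track=rewrite | github.com/brictp/tg-downloader-bot | utils/parser.py | parse_timestamp_to_ms
-- ===== SOURCE A (Python) =====
-- def parse_timestamp_to_ms(timestamp: str) -> int:
--     """
--     Convert string type 'MM:SS' or 'HH:MM:SS' to miliseconds
--     Valid examples: '1:34', '00:01:34', '01:02:03'
--     """
--     parts = timestamp.strip().split(":")
--     if not 1 <= len(parts) <= 3:
--         raise ValueError(f"Valid Format: '{timestamp}'")
--
--     parts = [int(p) for p in parts]
--     while len(parts) < 3:
--         parts.insert(0, 0)
--
--     hours, minutes, seconds = parts
--     total_ms = (hours * 3600 + minutes * 60 + seconds) * 1000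
--     return total_ms
-- ===== SOURCE B (Python) =====
-- def parse_timestamp_to_ms(timestamp: str) -> int:
--     """
--     Convert string type 'MM:SS' or 'HH:MM:SS' to miliseconds
--     Valid examples: '1:34', '00:01:34', '01:02:03'
--     """
--     parts = timestamp.strip().split(":")
--     if not 1 <= len(parts) <= 3:
--         raise ValueError(f"Valid Format: '{timestamp}'")
--
--     total = 0
--     for p in parts:
--         total = total * 60 + int(p)
--     return total * 1000
-- ===== Notes on version B (the rewrite author's own statement) =====
-- stated objective: simpler
-- what changed: Replaces the pad-to-three-parts loop and fixed-weight hours/minutes/seconds unpacking with a single Horner fold (total = total*60 + int(p)) over the split parts.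
import Mathlib
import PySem

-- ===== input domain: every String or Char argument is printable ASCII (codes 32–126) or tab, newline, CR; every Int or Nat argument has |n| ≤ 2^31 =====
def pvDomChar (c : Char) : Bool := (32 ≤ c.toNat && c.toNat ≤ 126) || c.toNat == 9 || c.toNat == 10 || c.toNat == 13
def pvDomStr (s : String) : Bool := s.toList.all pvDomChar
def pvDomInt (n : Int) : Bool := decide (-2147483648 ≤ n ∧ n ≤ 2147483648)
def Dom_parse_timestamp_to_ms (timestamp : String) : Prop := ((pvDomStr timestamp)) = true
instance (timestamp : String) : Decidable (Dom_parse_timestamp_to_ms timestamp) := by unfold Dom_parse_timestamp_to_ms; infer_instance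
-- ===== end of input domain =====

-- B replaces A's pad-to-three and fixed-weight unpack by a single Horner fold over the parts (simpler decomposition, same cost).


-- ===== PORT A =====
-- the `while len(parts) < 3: parts.insert(0, 0)` loop
def pvPad (l : List Int) : List Int :=
  if l.length < 3 then pvPad (0 :: l) else l
termination_by 3 - l.length

def parse_timestamp_to_ms (timestamp : String) : Int :=
  let parts := (PySem.Str.split? (PySem.Str.strip timestamp) ":").getD []
  if ¬ (1 ≤ parts.length ∧ parts.length ≤ 3) then 0   -- raise ValueError: excluded by Pre_
  else
    -- int(p); a failing int(p) raises ValueError (excluded by Pre_), getD 0 is never used inside Pre_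
    let ints := parts.map (fun p => (PySem.Int.ofStr? p).getD 0)
    match pvPad ints with
    | [h, m, s] => (h * 3600 + m * 60 + s) * 1000
    | _ => 0

-- ===== PORT B =====
def parse_timestamp_to_ms_alt (timestamp : String) : Int :=
  let parts := (PySem.Str.split? (PySem.Str.strip timestamp) ":").getD []
  if ¬ (1 ≤ parts.length ∧ parts.length ≤ 3) then 0   -- raise ValueError: excluded by Pre_
  else
    (parts.foldl (fun t p => t * 60 + (PySem.Int.ofStr? p).getD 0) 0) * 1000

-- ===== PRECONDITION & SPEC =====
-- Pre_ excludes exactly the inputs where A raises ValueError: more than three colon-separated parts, or a part that int() rejects.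
def Pre_parse_timestamp_to_ms (timestamp : String) : Prop :=
  let parts := (PySem.Str.split? (PySem.Str.strip timestamp) ":").getD []
  1 ≤ parts.length ∧ parts.length ≤ 3 ∧ ∀ p ∈ parts, (PySem.Int.ofStr? p).isSome = true
instance (timestamp : String) : Decidable (Pre_parse_timestamp_to_ms timestamp) := by
  unfold Pre_parse_timestamp_to_ms; infer_instance

def pvWitness_parse_timestamp_to_ms : String := "01:02:03"

def Spec_parse_timestamp_to_ms (timestamp : String) (out : Int) : Prop := out = parse_timestamp_to_ms_alt timestamp
instance (timestamp : String) (out : Int) : Decidable (Spec_parse_timestamp_to_ms timestamp out) := by unfold Spec_parse_timestamp_to_ms; infer_instance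

-- ===== CLAIM (what is proved, stated in full; the proofs are below) =====
def Claim_equal_parse_timestamp_to_ms : Prop := ∀ (timestamp : String), Dom_parse_timestamp_to_ms timestamp → Pre_parse_timestamp_to_ms timestamp → Spec_parse_timestamp_to_ms timestamp (parse_timestamp_to_ms timestamp)

-- ===== LEMMAS AND PROOFS =====
lemma pvPad_one (x : Int) : pvPad [x] = [0, 0, x] := by
  rw [pvPad]; norm_num; rw [pvPad]; norm_num; rw [pvPad]; norm_num

lemma pvPad_two (x y : Int) : pvPad [x, y] = [0, x, y] := by
  rw [pvPad]; norm_num; rw [pvPad]; norm_num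

lemma pvPad_three (x y z : Int) : pvPad [x, y, z] = [x, y, z] := by
  rw [pvPad]; norm_num

lemma pv_key (xs : List String) :
    (if ¬ (1 ≤ xs.length ∧ xs.length ≤ 3) then (0 : Int)
     else
       match pvPad (xs.map (fun p => (PySem.Int.ofStr? p).getD 0)) with
       | [h, m, s] => (h * 3600 + m * 60 + s) * 1000
       | _ => 0)
    = (if ¬ (1 ≤ xs.length ∧ xs.length ≤ 3) then (0 : Int)
       else (xs.foldl (fun t p => t * 60 + (PySem.Int.ofStr? p).getD 0) 0) * 1000) := by
  rcases xs with _ | ⟨a, _ | ⟨b, _ | ⟨c, _ | ⟨d, t⟩⟩⟩⟩ <;>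
    simp [List.foldl, pvPad_one, pvPad_two, pvPad_three, List.length] <;> try ring

-- ===== VERDICT (by name: the statement is the Claim_ definition above) =====
theorem parse_timestamp_to_ms_spec : Claim_equal_parse_timestamp_to_ms := by
  intro ts _ _
  unfold Spec_parse_timestamp_to_ms parse_timestamp_to_ms parse_timestamp_to_ms_alt
  exact pv_key _
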